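-- pv_equiv track=rewrite | github.com/GlenboLake/aoc2019 | util.py | dict_str
-- ===== SOURCE A (Python) =====
-- def dict_str(d):
--     width = max(k[0] for k in d) + 1
--     height = max(k[1] for k in d) + 1
--
--     s = ''
--     for row in range(height):
--         for col in range(width):
--             s += '#' if d.get((col, row), 0) else ' '
--         s += '\n'
--     return s
-- ===== SOURCE B (Python) =====
-- def dict_str(d):
--     width = max(k[0] for k in d) + 1
--     height = max(k[1] for k in d) + 1
--
--     grid = [[' '] * width for _ in range(height)]
--     for (col, row), value in d.items():
--         if value and 0 <= col < width and 0 <= row < height: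
--             grid[row][col] = '#'
--     return ''.join(''.join(r) + '\n' for r in grid)
-- ===== Notes on version B (the rewrite author's own statement) =====
-- stated objective: alternative
-- what changed: B scatters the dict's sparse entries into a preallocated width-by-height character grid and joins the rows once, instead of A's probing the dict once per grid cell while growing the string by repeated concatenation.
import Mathlib
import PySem

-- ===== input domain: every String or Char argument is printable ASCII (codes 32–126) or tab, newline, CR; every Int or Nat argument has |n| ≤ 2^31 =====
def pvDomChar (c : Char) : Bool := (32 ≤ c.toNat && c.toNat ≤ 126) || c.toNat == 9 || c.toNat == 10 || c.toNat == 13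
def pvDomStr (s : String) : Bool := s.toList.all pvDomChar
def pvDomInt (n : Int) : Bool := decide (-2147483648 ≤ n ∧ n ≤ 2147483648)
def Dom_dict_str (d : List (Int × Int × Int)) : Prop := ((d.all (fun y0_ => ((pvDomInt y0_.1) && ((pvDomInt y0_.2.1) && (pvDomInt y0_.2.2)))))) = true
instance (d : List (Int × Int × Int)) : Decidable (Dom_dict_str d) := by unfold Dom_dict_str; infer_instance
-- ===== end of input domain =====

-- B replaces A's per-cell dict probe (one d.get for every cell of the width×height grid) by scattering the
-- dict's sparse entries into a preallocated grid of rows and joining the rows once; return value only.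

-- ===== PORT A =====
def dict_str (d : List (Int × Int × Int)) : String :=
  let dd : PySem.Dict (Int × Int) Int := PySem.Dict.ofList (d.map (fun t => ((t.1, t.2.1), t.2.2)))
  let width : Int := (PySem.List.max? (dd.keys.map Prod.fst) id).getD 0 + 1
  let height : Int := (PySem.List.max? (dd.keys.map (fun k => k.2)) id).getD 0 + 1
  let s := (PySem.List.pyRange 0 height).foldl (fun s row =>
      ((PySem.List.pyRange 0 width).foldl (fun s col =>
          s ++ (if dd.getD (col, row) 0 ≠ 0 then ['#'] else [' '])) s) ++ ['\n']) ([] : List Char)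
  String.mk s

-- ===== PORT B =====
-- the scatter loop of Source B: write '#' into the grid for every truthy, in-bounds entry
def pvScatter (width height : Int) (g : List (List Char)) (l : List ((Int × Int) × Int)) :
    List (List Char) :=
  l.foldl (fun g p =>
    if p.2 ≠ 0 ∧ 0 ≤ p.1.1 ∧ p.1.1 < width ∧ 0 ≤ p.1.2 ∧ p.1.2 < height then
      g.set p.1.2.toNat ((g.getD p.1.2.toNat []).set p.1.1.toNat '#')
    else g) g

def dict_str_alt (d : List (Int × Int × Int)) : String :=
  let dd : PySem.Dict (Int × Int) Int := PySem.Dict.ofList (d.map (fun t => ((t.1, t.2.1), t.2.2)))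
  let width : Int := (PySem.List.max? (dd.keys.map Prod.fst) id).getD 0 + 1
  let height : Int := (PySem.List.max? (dd.keys.map (fun k => k.2)) id).getD 0 + 1
  let grid := pvScatter width height
      (List.replicate height.toNat (List.replicate width.toNat ' ')) dd.items
  String.mk (grid.flatMap (fun r => r ++ ['\n']))

-- ===== PRECONDITION & SPEC =====
-- Pre_ excludes only the empty dict, on which Python A raises ValueError (max of an empty sequence).
def Pre_dict_str (d : List (Int × Int × Int)) : Prop := d ≠ []
instance (d : List (Int × Int × Int)) : Decidable (Pre_dict_str d) := by unfold Pre_dict_str; infer_instance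
def pvWitness_dict_str : (List (Int × Int × Int)) := [(0, 0, 1)]

def Spec_dict_str (d : List (Int × Int × Int)) (out : String) : Prop := out = dict_str_alt d
instance (d : List (Int × Int × Int)) (out : String) : Decidable (Spec_dict_str d out) := by unfold Spec_dict_str; infer_instance

-- ===== CLAIM (what is proved, stated in full; the proofs are below) =====
def Claim_equal_dict_str : Prop := ∀ (d : List (Int × Int × Int)), Dom_dict_str d → Pre_dict_str d → Spec_dict_str d (dict_str d)

-- ===== LEMMAS AND PROOFS =====

-- the fully written grid: H.toNat rows of W.toNat cells, cell (r,c) given by f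
def pvGridOf (W H : Int) (f : Nat → Nat → Char) : List (List Char) :=
  (List.range H.toNat).map (fun r => (List.range W.toNat).map (fun c => f r c))

-- some entry of l has key (c, r) and a truthy value
def pvHit (l : List ((Int × Int) × Int)) (r c : Nat) : Bool :=
  l.any (fun q => decide (q.1 = ((c : Int), (r : Int)) ∧ q.2 ≠ 0))

theorem pvHit_iff (l : List ((Int × Int) × Int)) (r c : Nat) :
    pvHit l r c = true ↔ ∃ v, (((c : Int), (r : Int)), v) ∈ l ∧ v ≠ 0 := by
  simp only [pvHit, List.any_eq_true, decide_eq_true_eq]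
  constructor
  · rintro ⟨q, hq, hk, hv⟩
    exact ⟨q.2, by rwa [← hk], hv⟩
  · rintro ⟨v, hv, hv0⟩
    exact ⟨_, hv, rfl, hv0⟩

theorem pvGridOf_congr {W H : Int} {f f' : Nat → Nat → Char}
    (h : ∀ r < H.toNat, ∀ c < W.toNat, f r c = f' r c) :
    pvGridOf W H f = pvGridOf W H f' := by
  unfold pvGridOf
  apply List.ext_getElem
  · simp
  · intro i h1 h2
    simp only [List.getElem_map, List.getElem_range]
    apply List.ext_getElem
    · simp
    · intro j hj1 hj2
      simp only [List.getElem_map, List.getElem_range]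
      exact h i (by simpa using h1) j (by simpa using hj1)

theorem pvGridOf_set {W H : Int} (f : Nat → Nat → Char) {col row : Int}
    (_hc0 : 0 ≤ col) (_hcW : col < W) (hr0 : 0 ≤ row) (hrH : row < H) :
    (pvGridOf W H f).set row.toNat (((pvGridOf W H f).getD row.toNat []).set col.toNat '#')
      = pvGridOf W H (fun r c => if r = row.toNat ∧ c = col.toNat then '#' else f r c) := by
  have hrow : row.toNat < (pvGridOf W H f).length := by
    simp only [pvGridOf, List.length_map, List.length_range]; omega
  rw [List.getD_eq_getElem _ _ hrow]
  apply List.ext_getElem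
  · simp [pvGridOf]
  · intro i h1 h2
    rw [List.getElem_set]
    by_cases hi : row.toNat = i
    · rw [if_pos hi]
      subst hi
      simp only [pvGridOf, List.getElem_map, List.getElem_range]
      apply List.ext_getElem
      · simp
      · intro j hj1 hj2
        rw [List.getElem_set]
        simp only [List.getElem_map, List.getElem_range]
        by_cases hj : col.toNat = j
        · subst hj
          simp
        · rw [if_neg hj, if_neg]
          intro hcon
          exact hj hcon.2.symm
    · rw [if_neg hi]
      simp only [pvGridOf, List.getElem_map, List.getElem_range]
      apply List.ext_getElem
      · simp
      · intro j hj1 hj2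
        simp only [List.getElem_map, List.getElem_range]
        rw [if_neg]
        intro hcon
        exact hi hcon.1.symm

theorem pvScatter_gridOf (W H : Int) (l : List ((Int × Int) × Int)) :
    ∀ f : Nat → Nat → Char,
      pvScatter W H (pvGridOf W H f) l
        = pvGridOf W H (fun r c => if pvHit l r c then '#' else f r c) := by
  induction l with
  | nil =>
      intro f
      simp only [pvScatter, List.foldl_nil]
      apply pvGridOf_congr
      intro r _ c _
      simp [pvHit]
  | cons p l ih =>
      intro f
      simp only [pvScatter, List.foldl_cons] at *
      by_cases hp : p.2 ≠ 0 ∧ 0 ≤ p.1.1 ∧ p.1.1 < W ∧ 0 ≤ p.1.2 ∧ p.1.2 < H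
      · rw [if_pos hp, pvGridOf_set f hp.2.1 hp.2.2.1 hp.2.2.2.1 hp.2.2.2.2, ih]
        apply pvGridOf_congr
        intro r hr c hc
        by_cases htl : pvHit l r c = true
        · rw [if_pos htl, if_pos]
          rw [pvHit_iff] at htl ⊢
          obtain ⟨v, hv, hv0⟩ := htl
          exact ⟨v, List.mem_cons_of_mem _ hv, hv0⟩
        · rw [if_neg htl]
          by_cases hk : r = p.1.2.toNat ∧ c = p.1.1.toNat
          · rw [if_pos hk, if_pos]
            rw [pvHit_iff]
            refine ⟨p.2, ?_, hp.1⟩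
            have h1 : (c : Int) = p.1.1 := by omega
            have h2 : (r : Int) = p.1.2 := by omega
            rw [h1, h2]
            exact List.mem_cons_self ..
          · rw [if_neg hk, if_neg]
            rw [pvHit_iff]
            rintro ⟨v, hv, hv0⟩
            rcases List.mem_cons.mp hv with h | h
            · have h1 : ((c : Int), (r : Int)) = p.1 := congrArg Prod.fst h
              apply hk
              have hc1 := congrArg Prod.fst h1
              have hr1 := congrArg Prod.snd h1
              simp only at hc1 hr1
              constructor <;> omega
            · rw [pvHit_iff] at htl
              exact htl ⟨v, h, hv0⟩
      · rw [if_neg hp, ih]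
        apply pvGridOf_congr
        intro r hr c hc
        apply if_congr _ rfl rfl
        rw [pvHit_iff, pvHit_iff]
        constructor
        · rintro ⟨v, hv, hv0⟩; exact ⟨v, List.mem_cons_of_mem _ hv, hv0⟩
        · rintro ⟨v, hv, hv0⟩
          rcases List.mem_cons.mp hv with h | h
          · exfalso
            have h1 : ((c : Int), (r : Int)) = p.1 := congrArg Prod.fst h
            have hv2 : v = p.2 := congrArg Prod.snd h
            have hc1 := congrArg Prod.fst h1
            have hr1 := congrArg Prod.snd h1
            simp only at hc1 hr1
            exact hp ⟨by omega, by omega, by omega, by omega, by omega⟩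
          · exact ⟨v, h, hv0⟩

theorem pvDict_getD_ne_iff (dd : PySem.Dict (Int × Int) Int) (h : dd.keys.Nodup) (r c : Nat) :
    (dd.getD ((c : Int), (r : Int)) 0 ≠ 0) ↔ pvHit dd.items r c = true := by
  rw [pvHit_iff, PySem.Dict.getD_eq_get?_getD]
  cases hg : dd.get? ((c : Int), (r : Int)) with
  | none =>
      simp only [Option.getD_none, ne_eq, not_true_eq_false, false_iff]
      rintro ⟨v, hv, hv0⟩
      have := PySem.Dict.get?_of_mem_items dd hv h
      rw [hg] at this; cases this
  | some v =>
      simp only [Option.getD_some]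
      constructor
      · intro hv0
        exact ⟨v, PySem.Dict.mem_items_of_get?_eq_some dd hg, hv0⟩
      · rintro ⟨v', hv', hv0⟩
        have := PySem.Dict.get?_of_mem_items dd hv' h
        rw [hg] at this
        cases this
        exact hv0

theorem pvGridOf_replicate (W H : Int) :
    List.replicate H.toNat (List.replicate W.toNat ' ') = pvGridOf W H (fun _ _ => ' ') := by
  simp [pvGridOf, List.map_const']

-- ===== VERDICT (by name: the statement is the Claim_ definition above) =====
theorem dict_str_spec : Claim_equal_dict_str := by
  intro d _ _
  show dict_str d = dict_str_alt d
  simp only [dict_str, dict_str_alt]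
  set dd : PySem.Dict (Int × Int) Int :=
    PySem.Dict.ofList (d.map (fun t => ((t.1, t.2.1), t.2.2))) with hdd
  set W : Int := (PySem.List.max? (dd.keys.map Prod.fst) id).getD 0 + 1 with hW
  set H : Int := (PySem.List.max? (dd.keys.map (fun k => k.2)) id).getD 0 + 1 with hH
  have hnd : dd.keys.Nodup := by rw [hdd]; exact PySem.Dict.nodup_keys_ofList _
  have hgrid : pvScatter W H (List.replicate H.toNat (List.replicate W.toNat ' ')) dd.items
      = pvGridOf W H (fun r c => if dd.getD ((c : Int), (r : Int)) 0 ≠ 0 then '#' else ' ') := by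
    rw [pvGridOf_replicate, pvScatter_gridOf]
    apply pvGridOf_congr
    intro r _ c _
    by_cases hcell : dd.getD ((c : Int), (r : Int)) 0 ≠ 0
    · rw [if_pos ((pvDict_getD_ne_iff dd hnd r c).mp hcell), if_pos hcell]
    · rw [if_neg (fun hh => hcell ((pvDict_getD_ne_iff dd hnd r c).mpr hh)), if_neg hcell]
  rw [hgrid]
  apply congrArg String.mk
  simp only [PySem.List.foldl_append_eq_flatMap, List.append_assoc]
  simp only [List.nil_append, pvGridOf, List.flatMap_map, PySem.List.pyRange_one,
    Int.sub_zero, zero_add]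
  apply List.flatMap_congr
  intro r _
  congr 1
  simp only [← apply_ite (fun c => ([c] : List Char))]
  exact (List.map_eq_flatMap).symm
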